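-- pv_equiv track=rewrite | github.com/pypi-data/pypi-mirror-403 | packages/qhronology/qhronology-1.0.2-py3-none-any.whl/qhronology/utilities/diagrams.py | partition_systems
-- ===== SOURCE A (Python) =====
-- def partition_systems(systems, boundaries):
--     systems = sorted(list(set(systems)))
--     boundaries = sorted(list(set(boundaries)))
--     partitions = []
--     boundaries[-1] = max(max(systems), max(boundaries))
--     boundaries.sort()
--     for n in boundaries:
--         remaining = list(systems)
--         current = []
--         for m in remaining:
--             if m <= n:
--                 current.append(m)
--                 systems.remove(m)
--         current.sort()
--         partitions.append(current)
--
--     return partitions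
-- ===== SOURCE B (Python) =====
-- def partition_systems(systems, boundaries):
--     ss = sorted(set(systems))
--     bs = sorted(set(boundaries))
--     bs[-1] = max(ss[-1], bs[-1])
--     out = []
--     i = 0
--     for n in bs:
--         j = i
--         while j < len(ss) and ss[j] <= n:
--             j += 1
--         out.append(ss[i:j])
--         i = j
--     return out
-- ===== Notes on version B (the rewrite author's own statement) =====
-- stated objective: faster
-- what changed: A rescans and mutates the remaining systems list for every boundary (remove inside a nested loop, plus a redundant re-sort per group); B does one two-pointer sweep over the sorted deduplicated systems, slicing each group off in a single pass.
import Mathlib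
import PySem

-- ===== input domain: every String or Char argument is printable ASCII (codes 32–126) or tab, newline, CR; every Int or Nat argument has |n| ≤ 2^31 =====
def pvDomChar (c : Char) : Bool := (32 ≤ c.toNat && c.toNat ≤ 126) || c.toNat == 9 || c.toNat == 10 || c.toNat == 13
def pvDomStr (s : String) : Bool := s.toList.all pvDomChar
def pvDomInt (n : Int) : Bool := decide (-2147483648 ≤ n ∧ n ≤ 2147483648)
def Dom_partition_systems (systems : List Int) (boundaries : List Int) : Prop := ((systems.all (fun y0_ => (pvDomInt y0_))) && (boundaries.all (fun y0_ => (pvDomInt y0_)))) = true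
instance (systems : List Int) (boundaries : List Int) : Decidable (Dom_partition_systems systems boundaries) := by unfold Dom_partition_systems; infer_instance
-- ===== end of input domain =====

-- B replaces A's per-boundary rescan/remove of the systems list by a single two-pointer
-- sweep over the sorted deduplicated systems (objective: faster).

-- ===== PORT A =====
-- inner loop: 'for m in remaining: if m <= n: current.append(m); systems.remove(m)'
-- (remaining is the copy 'list(systems)'; .getD is a totality guard only — the removed element is always present here)
def pyInnerA (n : Int) (remaining : List Int) (sys : List Int) : List Int × List Int :=
  remaining.foldl
    (fun (st : List Int × List Int) m =>
      if m ≤ n then (st.1 ++ [m], (PySem.List.remove? st.2 m).getD st.2) else st)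
    ([], sys)

def partition_systems (systems : List Int) (boundaries : List Int) : List (List Int) :=
  let ss := PySem.List.sorted (PySem.Set.ofList systems) (fun x => x) false
  let bs := PySem.List.sorted (PySem.Set.ofList boundaries) (fun x => x) false
  -- boundaries[-1] = max(max(systems), max(boundaries)); boundaries.sort(): Python raises on an
  -- empty systems (ValueError) or boundaries (IndexError) — those inputs are excluded by Pre_
  match PySem.List.max? ss (fun x => x), PySem.List.max? bs (fun x => x) with
  | some ms, some mb =>
      let bs2 := PySem.List.sorted (bs.dropLast ++ [max ms mb]) (fun x => x) false
      (bs2.foldl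
        (fun (st : List Int × List (List Int)) n =>
          let inner := pyInnerA n st.1 st.1
          (inner.2, st.2 ++ [PySem.List.sorted inner.1 (fun x => x) false]))
        (ss, [])).2
  | _, _ => []

-- ===== PORT B =====
-- the two-pointer sweep: each boundary slices the next ≤-prefix off the remaining systems
def pySweepB : List Int → List Int → List (List Int)
  | _, [] => []
  | ss, n :: bs =>
      ss.takeWhile (fun m => m ≤ n) :: pySweepB (ss.dropWhile (fun m => m ≤ n)) bs

def partition_systems_alt (systems : List Int) (boundaries : List Int) : List (List Int) :=
  let ss := PySem.List.sorted (PySem.Set.ofList systems) (fun x => x) false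
  let bs := PySem.List.sorted (PySem.Set.ofList boundaries) (fun x => x) false
  -- bs[-1] = max(ss[-1], bs[-1]); B raises too on empty inputs (excluded by Pre_)
  match PySem.List.pyGet? ss (-1) with
  | none => []
  | some ms =>
    match PySem.List.pyGet? bs (-1) with
    | none => []
    | some mb => pySweepB ss (bs.dropLast ++ [max ms mb])

-- ===== PRECONDITION & SPEC =====
-- Pre_ excludes exactly the inputs where Python A raises: empty systems (ValueError from max())
-- or empty boundaries (IndexError on boundaries[-1]); B raises there as well.
def Pre_partition_systems (systems : List Int) (boundaries : List Int) : Prop :=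
  systems ≠ [] ∧ boundaries ≠ []
instance (systems : List Int) (boundaries : List Int) : Decidable (Pre_partition_systems systems boundaries) := by unfold Pre_partition_systems; infer_instance

def pvWitness_partition_systems : List Int × List Int := ([1, 2, 5], [2, 9])

def Spec_partition_systems (systems : List Int) (boundaries : List Int) (out : List (List Int)) : Prop := out = partition_systems_alt systems boundaries
instance (systems : List Int) (boundaries : List Int) (out : List (List Int)) : Decidable (Spec_partition_systems systems boundaries out) := by unfold Spec_partition_systems; infer_instance

-- ===== CLAIM (what is proved, stated in full; the proofs are below) =====
def Claim_equal_partition_systems : Prop := ∀ (systems : List Int) (boundaries : List Int), Dom_partition_systems systems boundaries → Pre_partition_systems systems boundaries → Spec_partition_systems systems boundaries (partition_systems systems boundaries)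

-- ===== LEMMAS AND PROOFS =====

-- a running max over an already ≤-sorted chain is the last element
theorem pv_foldl_max_sorted : ∀ (l : List Int) (x : Int), (x :: l).Pairwise (· ≤ ·) →
    l.foldl max x = (x :: l).getLast (by simp) := by
  intro l
  induction l with
  | nil => intro x _; simp
  | cons y l ih =>
    intro x h
    have hxy : x ≤ y := (List.pairwise_cons.1 h).1 y (by simp)
    have h' : (y :: l).Pairwise (· ≤ ·) := (List.pairwise_cons.1 h).2
    simp only [List.foldl_cons]
    rw [max_eq_right hxy, ih y h']
    cases l <;> simp [List.getLast]

-- max? of a ≤-sorted list is its last element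
theorem pv_max?_sorted (l : List Int) (h : l.Pairwise (· ≤ ·)) :
    PySem.List.max? l (fun x => x) = l.getLast? := by
  cases l with
  | nil => simp [PySem.List.max?]
  | cons x t =>
    rw [PySem.List.max?_id_cons, pv_foldl_max_sorted t x h]
    simp [List.getLast?_eq_some_getLast]

-- on a ≤-sorted list, filtering (≤ n) is taking the prefix …
theorem pv_filter_le_eq_takeWhile (n : Int) : ∀ (l : List Int), l.Pairwise (· ≤ ·) →
    l.filter (fun m => m ≤ n) = l.takeWhile (fun m => m ≤ n) := by
  intro l
  induction l with
  | nil => intro _; rfl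
  | cons x t ih =>
    intro h
    by_cases hx : x ≤ n
    · simp [hx, ih (List.pairwise_cons.1 h).2]
    · have hall : ∀ m ∈ t, ¬ (m ≤ n) := fun m hm hmn =>
        hx (le_trans ((List.pairwise_cons.1 h).1 m hm) hmn)
      simp only [List.filter_cons, List.takeWhile_cons, decide_eq_true_eq]
      rw [if_neg hx, if_neg hx]
      simp [List.filter_eq_nil_iff]
      intro m hm; exact lt_of_not_ge (hall m hm)

-- … and filtering (> n) is dropping it
theorem pv_filter_gt_eq_dropWhile (n : Int) : ∀ (l : List Int), l.Pairwise (· ≤ ·) →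
    l.filter (fun m => !(m ≤ n : Bool)) = l.dropWhile (fun m => m ≤ n) := by
  intro l
  induction l with
  | nil => intro _; rfl
  | cons x t ih =>
    intro h
    by_cases hx : x ≤ n
    · simp [hx, ih (List.pairwise_cons.1 h).2]
    · have hall : ∀ m ∈ t, ¬ (m ≤ n) := fun m hm hmn =>
        hx (le_trans ((List.pairwise_cons.1 h).1 m hm) hmn)
      simp only [List.filter_cons, List.dropWhile_cons, decide_eq_true_eq]
      rw [if_neg hx]
      simp [hx, List.filter_eq_self]
      intro m hm; exact lt_of_not_ge (hall m hm)

-- A's inner loop, with the already-kept (> n) elements 'keep' in front of the untraversed rest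
theorem pv_innerA : ∀ (s keep cur : List Int) (n : Int), (keep ++ s).Nodup →
    s.foldl
      (fun (st : List Int × List Int) m =>
        if m ≤ n then (st.1 ++ [m], (PySem.List.remove? st.2 m).getD st.2) else st)
      (cur, keep ++ s)
    = (cur ++ s.filter (fun m => m ≤ n), keep ++ s.filter (fun m => !(m ≤ n : Bool))) := by
  intro s
  induction s with
  | nil => intro keep cur n _; simp
  | cons m s ih =>
    intro keep cur n hnd
    by_cases hm : m ≤ n
    · have hmem : m ∈ keep ++ m :: s := by simp
      have hrem : (PySem.List.remove? (keep ++ m :: s) m).getD (keep ++ m :: s) = keep ++ s := by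
        rw [PySem.List.remove?_eq_some_erase _ _ hmem]
        have hk : m ∉ keep := by
          intro hmk
          exact (List.disjoint_of_nodup_append hnd) hmk (by simp)
        rw [Option.getD_some, List.erase_append_right _ hk, List.erase_cons_head]
      have hnd' : (keep ++ s).Nodup := by
        have := hnd.sublist (l₁ := keep ++ s) ?_
        · exact this
        · exact (List.append_sublist_append_left keep).2 (List.sublist_cons_self m s)
      simp only [List.foldl_cons, if_pos hm, hrem, ih keep (cur ++ [m]) n hnd']
      simp [hm]
    · have hnd' : ((keep ++ [m]) ++ s).Nodup := by simpa using hnd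
      have := ih (keep ++ [m]) cur n hnd'
      simp only [List.foldl_cons, if_neg hm]
      rw [show keep ++ m :: s = (keep ++ [m]) ++ s by simp]
      rw [this]
      simp [hm]

-- A's outer loop over the boundaries equals B's sweep
theorem pv_outer : ∀ (bs ss : List Int) (acc : List (List Int)), ss.Pairwise (· < ·) →
    (bs.foldl
      (fun (st : List Int × List (List Int)) n =>
        let inner := pyInnerA n st.1 st.1
        (inner.2, st.2 ++ [PySem.List.sorted inner.1 (fun x => x) false]))
      (ss, acc)).2 = acc ++ pySweepB ss bs := by
  intro bs
  induction bs with
  | nil => intro ss acc _; simp [pySweepB]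
  | cons n bs ih =>
    intro ss acc hss
    have hle : ss.Pairwise (· ≤ ·) := hss.imp le_of_lt
    have hnd : ss.Nodup := hss.imp ne_of_lt
    have hinner : pyInnerA n ss ss
        = (ss.takeWhile (fun m => m ≤ n), ss.dropWhile (fun m => m ≤ n)) := by
      have := pv_innerA ss [] [] n (by simpa using hnd)
      simp only [List.nil_append] at this
      unfold pyInnerA
      rw [this, pv_filter_le_eq_takeWhile n ss hle, pv_filter_gt_eq_dropWhile n ss hle]
    have hsorted : PySem.List.sorted (ss.takeWhile (fun m => m ≤ n)) (fun x => x) false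
        = ss.takeWhile (fun m => m ≤ n) :=
      PySem.List.sorted_eq_self_of_pairwise _ _ (hle.sublist (List.takeWhile_sublist _))
    have hdrop : (ss.dropWhile (fun m => m ≤ n)).Pairwise (· < ·) :=
      hss.sublist (List.dropWhile_sublist _)
    simp only [List.foldl_cons, hinner]
    rw [ih _ _ hdrop]
    simp [pySweepB, hsorted]

-- ===== VERDICT (by name: the statement is the Claim_ definition above) =====
theorem partition_systems_spec : Claim_equal_partition_systems := by
  intro systems boundaries _ hpre
  obtain ⟨hs, hb⟩ := hpre
  unfold Spec_partition_systems partition_systems partition_systems_alt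
  dsimp only
  have hssne : PySem.List.sorted (PySem.Set.ofList systems) (fun x => x) false ≠ [] := by
    rw [Ne, PySem.List.sorted_eq_nil_iff]
    cases systems with
    | nil => exact absurd rfl hs
    | cons x t =>
      intro hnil
      have : x ∈ PySem.Set.ofList (x :: t) := by
        rw [PySem.Set.mem_ofList]; simp
      rw [hnil] at this; exact absurd this (by simp)
  have hbsne : PySem.List.sorted (PySem.Set.ofList boundaries) (fun x => x) false ≠ [] := by
    rw [Ne, PySem.List.sorted_eq_nil_iff]
    cases boundaries with
    | nil => exact absurd rfl hb
    | cons x t =>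
      intro hnil
      have : x ∈ PySem.Set.ofList (x :: t) := by
        rw [PySem.Set.mem_ofList]; simp
      rw [hnil] at this; exact absurd this (by simp)
  set ss := PySem.List.sorted (PySem.Set.ofList systems) (fun x => x) false with hssdef
  set bs := PySem.List.sorted (PySem.Set.ofList boundaries) (fun x => x) false with hbsdef
  have hsslt : ss.Pairwise (· < ·) := PySem.List.sorted_ofList_pairwise_lt systems
  have hbslt : bs.Pairwise (· < ·) := PySem.List.sorted_ofList_pairwise_lt boundaries
  have hssle : ss.Pairwise (· ≤ ·) := hsslt.imp le_of_lt
  have hbsle : bs.Pairwise (· ≤ ·) := hbslt.imp le_of_lt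
  have hms : ss.getLast? = some (ss.getLast hssne) := List.getLast?_eq_some_getLast hssne
  have hmb : bs.getLast? = some (bs.getLast hbsne) := List.getLast?_eq_some_getLast hbsne
  rw [pv_max?_sorted ss hssle, pv_max?_sorted bs hbsle,
      PySem.List.pyGet?_neg_one, PySem.List.pyGet?_neg_one, hms, hmb]
  simp only []
  -- A re-sorts (boundaries with its last entry raised); that list is already sorted
  have hbs2 : PySem.List.sorted
      (bs.dropLast ++ [max (ss.getLast hssne) (bs.getLast hbsne)]) (fun x => x) false
      = bs.dropLast ++ [max (ss.getLast hssne) (bs.getLast hbsne)] := by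
    apply PySem.List.sorted_eq_self_of_pairwise
    have hsplit : bs.dropLast ++ [bs.getLast hbsne] = bs := List.dropLast_append_getLast hbsne
    have hb' : (bs.dropLast ++ [bs.getLast hbsne]).Pairwise (· ≤ ·) := by rw [hsplit]; exact hbsle
    have hparts := List.pairwise_append.1 hb'
    refine List.pairwise_append.2 ⟨hparts.1, List.pairwise_singleton _ _, ?_⟩
    intro a ha b hbmem
    have hbv : b = max (ss.getLast hssne) (bs.getLast hbsne) := by simpa using hbmem
    have : a ≤ bs.getLast hbsne := hparts.2.2 a ha _ (by simp)
    rw [hbv]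
    exact le_trans this (le_max_right _ _)
  rw [hbs2, pv_outer _ ss [] hsslt]
  simp
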